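-- pv_equiv track=rewrite | github.com/enaa99/Algorithm | baekjoonPython/프로그래머스/숫자게임.py | solution
-- ===== SOURCE A (Python) =====
-- def solution(A, B):
--     answer = 0
--
--
--     A.sort()
--     B.sort()
--
--     idx = 0
--
--     for i in A:
--         while idx < len(B):
--             if B[idx] > i:
--                 answer +=1
--                 idx +=1
--                 break
--             idx+=1
--
--
--
--     return answer
-- ===== SOURCE B (Python) =====
-- def _merge_events(A, B):
--     # merge the two sorted lists into one ascending stream of (value, is_a) events;
--     # on equal values the B event comes first, since b beats only strictly smaller a
--     i = j = 0
--     out = []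
--     while i < len(A) and j < len(B):
--         if A[i] < B[j]:
--             out.append((A[i], True))
--             i += 1
--         else:
--             out.append((B[j], False))
--             j += 1
--     out.extend((a, True) for a in A[i:])
--     out.extend((b, False) for b in B[j:])
--     return out
--
--
-- def solution(A, B):
--     A.sort()
--     B.sort()
--     # sweep line over the merged event stream: an A-event releases one "available"
--     # (strictly smaller) element, a B-event scores by consuming one if available.
--     # No pairs are ever matched explicitly, only the availability counter is kept.
--     answer = 0
--     avail = 0
--     for _, is_a in _merge_events(A, B):
--         if is_a:
--             avail += 1
--         elif avail:
--             avail -= 1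
--             answer += 1
--     return answer
-- ===== Notes on version B (the rewrite author's own statement) =====
-- stated objective: alternative
-- what changed: Replaces A's pointer-based greedy that matches each ascending a to a concrete b in B with a sweep line: the two sorted lists are merged into one ascending event stream and a single availability counter is swept over it (an A-event releases capacity, a B-event scores by consuming one unit); no pair is ever matched.
import Mathlib
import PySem

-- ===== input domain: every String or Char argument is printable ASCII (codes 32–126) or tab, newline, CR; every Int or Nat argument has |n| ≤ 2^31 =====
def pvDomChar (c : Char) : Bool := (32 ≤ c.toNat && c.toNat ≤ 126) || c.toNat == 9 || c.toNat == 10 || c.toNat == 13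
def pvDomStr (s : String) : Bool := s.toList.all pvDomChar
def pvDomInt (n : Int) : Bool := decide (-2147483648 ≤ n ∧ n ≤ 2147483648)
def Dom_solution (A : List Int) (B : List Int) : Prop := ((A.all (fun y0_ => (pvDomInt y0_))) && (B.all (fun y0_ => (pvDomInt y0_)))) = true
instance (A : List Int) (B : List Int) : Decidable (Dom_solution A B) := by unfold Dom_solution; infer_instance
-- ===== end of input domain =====

-- B replaces A's pointer-based greedy (each ascending a matched to a concrete b) by a sweep line
-- over the merged event stream of both sorted lists, keeping only an availability counter
-- (alternative decomposition, same cost). Both Pythons sort A and B in place; the equivalence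
-- proved here is about the return value (the mutation is identical anyway).

-- ===== PORT A =====
-- the inner `while idx < len(B): if B[idx] > i: answer+=1; idx+=1; break; idx+=1`
def solWhile (Bs : List Int) (i : Int) (idx : Nat) (answer : Int) : Int × Nat :=
  if h : idx < Bs.length then
    if Bs[idx] > i then (answer + 1, idx + 1)
    else solWhile Bs i (idx + 1) answer
  else (answer, idx)
termination_by Bs.length - idx

def solution (A : List Int) (B : List Int) : Int :=
  let As := PySem.List.sorted A (fun x => x) false
  let Bs := PySem.List.sorted B (fun x => x) false
  (As.foldl (fun (st : Int × Nat) i => solWhile Bs i st.2 st.1) (0, 0)).1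

-- ===== PORT B =====
-- `_merge_events`: merge the two sorted lists into one ascending (value, is_a) event stream,
-- B events first on ties
def mergeEvents : List Int → List Int → List (Int × Bool)
  | [], bs => bs.map (fun b => (b, false))
  | as, [] => as.map (fun a => (a, true))
  | a :: as, b :: bs =>
      if a < b then (a, true) :: mergeEvents as (b :: bs)
      else (b, false) :: mergeEvents (a :: as) bs
termination_by as bs => as.length + bs.length

-- one step of B's sweep: state = (answer, avail)
def sweepStep (st : Int × Int) (e : Int × Bool) : Int × Int :=
  if e.2 then (st.1, st.2 + 1)
  else if st.2 ≠ 0 then (st.1 + 1, st.2 - 1) else st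

def solution_alt (A : List Int) (B : List Int) : Int :=
  let As := PySem.List.sorted A (fun x => x) false
  let Bs := PySem.List.sorted B (fun x => x) false
  ((mergeEvents As Bs).foldl sweepStep (0, 0)).1

-- ===== PRECONDITION & SPEC =====
def Spec_solution (A : List Int) (B : List Int) (out : Int) : Prop := out = solution_alt A B
instance (A : List Int) (B : List Int) (out : Int) : Decidable (Spec_solution A B out) := by unfold Spec_solution; infer_instance

-- ===== CLAIM (what is proved, stated in full; the proofs are below) =====
def Claim_equal_solution : Prop := ∀ (A : List Int) (B : List Int), Dom_solution A B → Spec_solution A B (solution A B)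

-- ===== LEMMAS AND PROOFS =====

-- structural version of A's forward greedy
def fwd : List Int → List Int → Int
  | [], _ => 0
  | _ :: _, [] => 0
  | a :: as, b :: bs => if b > a then 1 + fwd as bs else fwd (a :: as) bs

theorem fwd_nil_right : ∀ as, fwd as [] = 0 := by
  intro as; cases as <;> simp [fwd]

-- A's fold-with-index computes fwd on the dropped suffix
theorem foldl_solWhile (Bs : List Int) :
    ∀ as idx ans, (as.foldl (fun (st : Int × Nat) i => solWhile Bs i st.2 st.1) (ans, idx)).1
      = ans + fwd as (Bs.drop idx) := by
  intro as
  induction as with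
  | nil => intro idx ans; simp [fwd]
  | cons a as ih =>
    intro idx ans
    have inner : ∀ n idx ans, Bs.length - idx ≤ n →
        ((a :: as).foldl (fun (st : Int × Nat) i => solWhile Bs i st.2 st.1) (ans, idx)).1
          = ans + fwd (a :: as) (Bs.drop idx) := by
      intro n
      induction n with
      | zero =>
        intro idx ans h
        have hge : Bs.length ≤ idx := by omega
        have hnil : Bs.drop idx = [] := List.drop_eq_nil_of_le hge
        have hw : solWhile Bs a idx ans = (ans, idx) := by
          conv_lhs => rw [solWhile]
          rw [dif_neg (by omega)]
        simp only [List.foldl_cons, hw, ih, hnil, fwd_nil_right]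
      | succ n ihn =>
        intro idx ans h
        by_cases hlt : idx < Bs.length
        · have hdrop : Bs.drop idx = Bs[idx] :: Bs.drop (idx + 1) :=
            List.drop_eq_getElem_cons hlt
          by_cases hb : Bs[idx] > a
          · have hw : solWhile Bs a idx ans = (ans + 1, idx + 1) := by
              conv_lhs => rw [solWhile]
              rw [dif_pos hlt, if_pos hb]
            simp only [List.foldl_cons, hw, ih, hdrop, fwd, if_pos hb]
            ring
          · have hw : solWhile Bs a idx ans = solWhile Bs a (idx + 1) ans := by
              conv_lhs => rw [solWhile]
              rw [dif_pos hlt, if_neg hb]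
            have hrec := ihn (idx + 1) ans (by omega)
            simp only [List.foldl_cons] at hrec
            simp only [List.foldl_cons, hw]
            rw [hrec, hdrop]
            simp [fwd, hb]
        · have hge : Bs.length ≤ idx := by omega
          have hnil : Bs.drop idx = [] := List.drop_eq_nil_of_le hge
          have hw : solWhile Bs a idx ans = (ans, idx) := by
            conv_lhs => rw [solWhile]
            rw [dif_neg (by omega)]
          simp only [List.foldl_cons, hw, ih, hnil, fwd_nil_right]
    exact inner (Bs.length - idx) idx ans le_rfl

-- sweeping an all-B suffix consumes min(avail, length) units
theorem sweep_falses : ∀ (bs : List Int) (k : Nat) (ans : Int),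
    ((bs.map (fun b => (b, false))).foldl sweepStep (ans, (k : Int))).1
      = ans + ((min k bs.length : Nat) : Int) := by
  intro bs
  induction bs with
  | nil => intro k ans; simp
  | cons b bs ih =>
    intro k ans
    cases k with
    | zero =>
      have h0 : sweepStep (ans, ((0 : Nat) : Int)) (b, false) = (ans, ((0 : Nat) : Int)) := by
        simp [sweepStep]
      simp only [List.map_cons, List.foldl_cons, h0, ih]
      simp
    | succ k =>
      have h1 : sweepStep (ans, ((k + 1 : Nat) : Int)) (b, false) = (ans + 1, ((k : Nat) : Int)) := by
        simp [sweepStep]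
        omega
      simp only [List.map_cons, List.foldl_cons, h1, ih, List.length_cons]
      push_cast
      omega

-- sweeping an all-A suffix never changes the answer
theorem sweep_trues : ∀ (as : List Int) (v ans : Int),
    ((as.map (fun a => (a, true))).foldl sweepStep (ans, v)).1 = ans := by
  intro as
  induction as with
  | nil => intro v ans; simp
  | cons a as ih =>
    intro v ans
    have h1 : sweepStep (ans, v) (a, true) = (ans, v + 1) := by simp [sweepStep]
    simp only [List.map_cons, List.foldl_cons, h1, ih]

-- heads of a sorted list bound every element reachable by drop
theorem sorted_head_le_getElem (b : Int) (bs : List Int)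
    (hb : (b :: bs).Pairwise (· ≤ ·)) (k : Nat) (hk : k < (b :: bs).length) :
    b ≤ (b :: bs)[k] := by
  cases k with
  | zero => simp
  | succ k =>
    have hk' : k < bs.length := by simp only [List.length_cons] at hk; omega
    have hmem : (b :: bs)[k + 1] ∈ bs := by
      have : (b :: bs)[k + 1] = bs[k] := by simp
      rw [this]; exact List.getElem_mem _
    exact (List.pairwise_cons.mp hb).1 _ hmem

-- the sweep over the merged stream computes A's greedy count:
-- with k units already available, the k smallest remaining B elements are consumed for free
theorem sweep_merge : ∀ (n : Nat) (as bs : List Int), as.length + bs.length ≤ n →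
    bs.Pairwise (· ≤ ·) → ∀ (k : Nat) (ans : Int),
    ((mergeEvents as bs).foldl sweepStep (ans, (k : Int))).1
      = ans + ((min k bs.length : Nat) : Int) + fwd as (bs.drop k) := by
  intro n
  induction n with
  | zero =>
    intro as bs hlen _ k ans
    have ha : as = [] := List.eq_nil_of_length_eq_zero (by omega)
    have hb : bs = [] := List.eq_nil_of_length_eq_zero (by omega)
    subst ha; subst hb
    simp [mergeEvents, fwd]
  | succ n ihn =>
    intro as bs hlen hsort k ans
    match as, bs with
    | [], bs =>
      have hme : mergeEvents [] bs = bs.map (fun b => (b, false)) := by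
        rw [mergeEvents]
      rw [hme, sweep_falses]
      have : fwd [] (bs.drop k) = 0 := by simp [fwd]
      omega
    | a :: as, [] =>
      have hme : mergeEvents (a :: as) [] = (a :: as).map (fun a => (a, true)) := by
        rw [mergeEvents]
        simp
      rw [hme, sweep_trues]
      simp [fwd_nil_right]
    | a :: as, b :: bs =>
      have hbs : bs.Pairwise (· ≤ ·) := (List.pairwise_cons.mp hsort).2
      by_cases hab : a < b
      · have hme : mergeEvents (a :: as) (b :: bs) = (a, true) :: mergeEvents as (b :: bs) := by
          rw [mergeEvents]; rw [if_pos hab]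
        have hstep : sweepStep (ans, (k : Int)) (a, true) = (ans, ((k + 1 : Nat) : Int)) := by
          simp [sweepStep]
        rw [hme, List.foldl_cons, hstep,
            ihn as (b :: bs) (by simp at hlen ⊢; omega) hsort (k + 1) ans]
        by_cases hk : k < (b :: bs).length
        · have hdrop : (b :: bs).drop k = (b :: bs)[k] :: (b :: bs).drop (k + 1) :=
            List.drop_eq_getElem_cons hk
          have hgt : (b :: bs)[k] > a :=
            lt_of_lt_of_le hab (sorted_head_le_getElem b bs hsort k hk)
          rw [hdrop, fwd, if_pos hgt]
          have h1 : min (k + 1) (b :: bs).length = k + 1 := by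
            simp only [List.length_cons] at hk ⊢; omega
          have h2 : min k (b :: bs).length = k := by
            simp only [List.length_cons] at hk ⊢; omega
          rw [h1, h2]
          push_cast; ring
        · have hge : (b :: bs).length ≤ k := by omega
          have hd1 : (b :: bs).drop k = [] := List.drop_eq_nil_of_le hge
          have hd2 : (b :: bs).drop (k + 1) = [] := List.drop_eq_nil_of_le (by omega)
          rw [hd1, hd2, fwd_nil_right, fwd_nil_right]
          have h1 : min (k + 1) (b :: bs).length = (b :: bs).length := by omega
          have h2 : min k (b :: bs).length = (b :: bs).length := by omega
          rw [h1, h2]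
      · have hme : mergeEvents (a :: as) (b :: bs) = (b, false) :: mergeEvents (a :: as) bs := by
          rw [mergeEvents]; rw [if_neg hab]
        cases k with
        | zero =>
          have hstep : sweepStep (ans, ((0 : Nat) : Int)) (b, false) = (ans, ((0 : Nat) : Int)) := by
            simp [sweepStep]
          rw [hme, List.foldl_cons, hstep,
              ihn (a :: as) bs (by simp at hlen ⊢; omega) hbs 0 ans]
          have hfwd : fwd (a :: as) ((b :: bs).drop 0) = fwd (a :: as) bs := by
            rw [List.drop_zero, fwd, if_neg (by omega : ¬ b > a)]
          rw [hfwd]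
          simp
        | succ k =>
          have hstep : sweepStep (ans, ((k + 1 : Nat) : Int)) (b, false)
              = (ans + 1, ((k : Nat) : Int)) := by
            simp [sweepStep]
            omega
          rw [hme, List.foldl_cons, hstep,
              ihn (a :: as) bs (by simp at hlen ⊢; omega) hbs k (ans + 1)]
          have hdrop : (b :: bs).drop (k + 1) = bs.drop k := rfl
          rw [hdrop]
          have : min (k + 1) (b :: bs).length = min k bs.length + 1 := by
            simp only [List.length_cons]; omega
          rw [this]
          push_cast; ring

-- ===== VERDICT (by name: the statement is the Claim_ definition above) =====
theorem solution_spec : Claim_equal_solution := by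
  unfold Claim_equal_solution
  intro A B _
  unfold Spec_solution solution solution_alt
  simp only []
  set As := PySem.List.sorted A (fun x => x) false with hAs
  set Bs := PySem.List.sorted B (fun x => x) false with hBs
  have hB : Bs.Pairwise (· ≤ ·) := by
    simpa using PySem.List.sorted_pairwise (xs := B) (key := fun x => x)
  rw [foldl_solWhile Bs As 0 0]
  have := sweep_merge (As.length + Bs.length) As Bs le_rfl hB 0 0
  simp only [Nat.cast_zero] at this
  rw [this]
  simp
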